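-- pv_equiv track=rewrite | github.com/duckstation/chtdb | chtdb.py | cull_serials
-- ===== SOURCE A (Python) =====
-- def cull_serials(serials:list):
--     # remove serials where one is a prefix of another
--     serial_set = set(serials)
--     new_serials = []
--     for serial in serial_set:
--         found_prefix = False
--         for other_serial in serial_set:
--             if serial != other_serial and serial.startswith(other_serial):
--                 found_prefix = True
--                 break
--         if found_prefix:
--             continue
--         new_serials.append(serial)
--     return new_serials
-- ===== SOURCE B (Python) =====
-- def cull_serials(serials: list):
--     # keep a serial iff none of its proper prefixes is itself in the set;
--     # prefixes are grown one character at a time and probed in the hash set,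
--     # so the inner scan over all other serials disappears
--     serial_set = set(serials)
--
--     def keep(s):
--         prefix = ""
--         for c in s:
--             if prefix in serial_set:
--                 return False
--             prefix += c
--         return True
--
--     return list(filter(keep, serial_set))
-- ===== Notes on version B (the rewrite author's own statement) =====
-- stated objective: faster
-- what changed: instead of comparing every serial against every other serial with startswith, B filters the set with a predicate that grows each serial's prefix one character at a time and probes it in the hash set, removing the inner scan over all serials
import Mathlib
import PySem

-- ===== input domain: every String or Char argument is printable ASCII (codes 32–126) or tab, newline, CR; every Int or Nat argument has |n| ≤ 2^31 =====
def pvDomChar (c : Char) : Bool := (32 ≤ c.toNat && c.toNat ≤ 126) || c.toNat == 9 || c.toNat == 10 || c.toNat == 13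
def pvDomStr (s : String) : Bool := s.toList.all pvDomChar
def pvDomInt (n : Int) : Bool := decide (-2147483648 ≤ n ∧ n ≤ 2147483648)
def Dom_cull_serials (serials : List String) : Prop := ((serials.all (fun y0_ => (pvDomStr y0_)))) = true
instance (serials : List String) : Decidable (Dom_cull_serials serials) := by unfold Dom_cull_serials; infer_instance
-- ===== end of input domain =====

-- B replaces A's all-pairs startswith scan by a filter whose predicate grows each serial's
-- prefix one character at a time and probes the hash set (objective: faster).
-- ===== PORT A =====
def cull_serials (serials : List String) : List String :=
  let serial_set : PySem.Set String := PySem.Set.ofList serials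
  serial_set.foldl
    (fun new_serials serial =>
      -- for other_serial in serial_set: break on first hit = any
      let found_prefix :=
        serial_set.any (fun other_serial =>
          (serial != other_serial) && PySem.Str.startswith serial other_serial)
      if found_prefix then new_serials else new_serials ++ [serial])
    []

-- ===== PORT B =====
-- helper keep(s): grow prefix character by character, probing the set before each step
def pvKeep (serial_set : PySem.Set String) (pfx : List Char) : List Char → Bool
  | [] => true
  | c :: rest =>
      if PySem.Set.contains serial_set (String.ofList pfx) then false
      else pvKeep serial_set (pfx ++ [c]) rest

def cull_serials_alt (serials : List String) : List String :=
  let serial_set : PySem.Set String := PySem.Set.ofList serials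
  serial_set.filter (fun s => pvKeep serial_set [] s.toList)

-- ===== PRECONDITION & SPEC =====
def Spec_cull_serials (serials : List String) (out : List String) : Prop := out = cull_serials_alt serials
instance (serials : List String) (out : List String) : Decidable (Spec_cull_serials serials out) := by unfold Spec_cull_serials; infer_instance

-- ===== CLAIM (what is proved, stated in full; the proofs are below) =====
def Claim_equal_cull_serials : Prop := ∀ (serials : List String), Dom_cull_serials serials → Spec_cull_serials serials (cull_serials serials)

-- ===== LEMMAS AND PROOFS =====

-- pvKeep checks exactly the proper prefixes pfx ++ rest.take k, k < rest.length
theorem pvKeep_eq (S : List String) (rest pfx : List Char) :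
    pvKeep S pfx rest
      = !((List.range rest.length).any
            (fun k => PySem.Set.contains S (String.ofList (pfx ++ rest.take k)))) := by
  induction rest generalizing pfx with
  | nil => simp [pvKeep]
  | cons c cs ih =>
      rw [pvKeep, ih]
      cases hb : PySem.Set.contains S (String.ofList pfx) with
      | true =>
          rw [PySem.Set.contains_iff] at hb
          simp only [if_true]
          simp [List.range_succ_eq_map]
          intro h
          exact absurd hb h
      | false =>
          simp only [hb, Bool.false_eq_true, if_false, List.length_cons,
            List.range_succ_eq_map, List.any_cons, List.any_map, List.take_zero,
            List.append_nil, Bool.false_or]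
          congr 2
          funext k
          simp [Function.comp, List.take_succ_cons]

-- the two per-serial tests agree
theorem pred_eq (S : List String) (s : String) :
    (S.any (fun o => (s != o) && PySem.Str.startswith s o))
      = ((List.range s.toList.length).any
            (fun k => PySem.Set.contains S (String.ofList (s.toList.take k)))) := by
  rw [Bool.eq_iff_iff]
  simp only [List.any_eq_true, List.mem_range, Bool.and_eq_true, bne_iff_ne,
    PySem.Set.contains_iff, PySem.Str.startswith_eq, PySem.Chars.startswith_iff]
  constructor
  · rintro ⟨o, ho, hne, hpre⟩
    refine ⟨o.toList.length, ?_, ?_⟩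
    · have hle := hpre.length_le
      have hne' : o.toList.length ≠ s.toList.length := by
        intro h; exact hne (String.toList_inj.mp (hpre.eq_of_length h)).symm
      omega
    · have htake : s.toList.take o.toList.length = o.toList :=
        (List.prefix_iff_eq_take.mp hpre).symm
      rw [htake, String.ofList_toList]
      exact ho
  · rintro ⟨k, hk, hmem⟩
    refine ⟨String.ofList (s.toList.take k), hmem, ?_, ?_⟩
    · intro h
      have hlist : s.toList.take k = s.toList := by
        have := congrArg String.toList h
        simpa using this
      have := congrArg List.length hlist
      rw [List.length_take] at this
      omega
    · show (String.ofList (s.toList.take k)).toList <+: s.toList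
      rw [String.toList_ofList]
      exact List.take_prefix _ _

-- A's append-unless-found loop is a filter by the negated test
theorem foldlA_eq_filter (S : List String) :
    (S.foldl
      (fun new_serials serial =>
        let found_prefix :=
          S.any (fun other_serial =>
            (serial != other_serial) && PySem.Str.startswith serial other_serial)
        if found_prefix then new_serials else new_serials ++ [serial]) [])
      = S.filter (fun s =>
          !(S.any (fun o => (s != o) && PySem.Str.startswith s o))) := by
  have h : (fun (new_serials : List String) serial =>
        let found_prefix :=
          S.any (fun other_serial =>
            (serial != other_serial) && PySem.Str.startswith serial other_serial)
        if found_prefix then new_serials else new_serials ++ [serial])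
      = (fun acc s =>
          if (!(S.any (fun o => (s != o) && PySem.Str.startswith s o))) = true
          then acc ++ [s] else acc) := by
    funext acc s
    cases hb : S.any (fun o => (s != o) && PySem.Str.startswith s o) <;> simp
  rw [h, PySem.List.foldl_append_if_eq_filter]
  simp

-- ===== VERDICT (by name: the statement is the Claim_ definition above) =====
theorem cull_serials_spec : Claim_equal_cull_serials := by
  intro serials _
  unfold Spec_cull_serials cull_serials cull_serials_alt
  simp only []
  rw [foldlA_eq_filter]
  congr 1
  funext s
  rw [pvKeep_eq, pred_eq]
  simp
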